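-- pv_equiv track=rewrite | github.com/alicechi2/Markov-Text-Generator | hw8pr2.py | dollarify
-- ===== SOURCE A (Python) =====
-- PUNCTUATION = ['.', '!', '?']
--
-- def dollarify(wordList, k):
--     ''' adds k amount of '$' in front of each sentence '''
--     if type(wordList) != list:
--         return dollarify(wordList.split(), k)
--     elif len(wordList) == 0:
--         return []
--     else:
--         for i in range(len(wordList)):
--             if wordList[i][-1] in PUNCTUATION:
--                 return k*['$'] + wordList[:i + 1] + dollarify(wordList[i + 1:], k)
--         return k*['$'] + wordList
-- ===== SOURCE B (Python) =====
-- PUNCTUATION = ['.', '!', '?']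
--
-- def dollarify(wordList, k):
--     ''' adds k amount of '$' in front of each sentence (single linear pass) '''
--     if type(wordList) != list:
--         wordList = wordList.split()
--     out = []
--     start = True
--     for w in wordList:
--         if start:
--             out.extend(k * ['$'])
--         out.append(w)
--         start = w[-1] in PUNCTUATION
--     return out
-- ===== Notes on version B (the rewrite author's own statement) =====
-- stated objective: alternative
-- what changed: replaces A's recursion that re-slices and concatenates the list at every sentence boundary with a single linear pass keeping a 'sentence start' flag and appending to one output list
import Mathlib
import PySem

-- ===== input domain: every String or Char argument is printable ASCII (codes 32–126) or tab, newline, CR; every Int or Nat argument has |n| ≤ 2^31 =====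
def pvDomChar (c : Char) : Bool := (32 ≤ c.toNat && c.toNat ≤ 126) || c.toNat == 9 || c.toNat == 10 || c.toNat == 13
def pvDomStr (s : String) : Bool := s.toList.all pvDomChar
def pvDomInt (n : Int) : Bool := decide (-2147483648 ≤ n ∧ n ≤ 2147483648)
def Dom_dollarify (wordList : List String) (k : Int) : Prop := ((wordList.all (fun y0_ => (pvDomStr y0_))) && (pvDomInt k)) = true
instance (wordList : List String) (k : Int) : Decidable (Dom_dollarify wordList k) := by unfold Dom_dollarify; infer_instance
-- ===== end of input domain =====

-- B replaces A's recursion with repeated slicing/concatenation by one linear pass with a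
-- 'sentence start' flag; equivalence of the RETURN values is proved on Pre_ (no empty-string words).

-- ===== PORT A =====
-- wordList[i][-1] in PUNCTUATION; Python raises IndexError on "" (excluded by Pre_), here: false
def pvLastPunctA (w : String) : Bool :=
  match PySem.Str.pyGet? w (-1) with
  | some c => ['.', '!', '?'].contains c
  | none => false

-- the 'for i in range(len(wordList)): if …: return' loop = first index whose word ends in punctuation
def pvFindPunct : List String → Option Nat
  | [] => none
  | w :: ws => if pvLastPunctA w then some 0 else (pvFindPunct ws).map (· + 1)

def dollarify (wordList : List String) (k : Int) : List String :=
  if wordList.length = 0 then []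
  else
    match pvFindPunct wordList with
    | some i =>
        -- k*['$'] + wordList[:i+1] + dollarify(wordList[i+1:], k)
        List.replicate k.toNat "$" ++ wordList.take (i + 1) ++ dollarify (wordList.drop (i + 1)) k
    | none => List.replicate k.toNat "$" ++ wordList
termination_by wordList.length
decreasing_by
  simp only [List.length_drop]
  omega

-- ===== PORT B =====
def pvLastPunctB (w : String) : Bool :=
  match PySem.Str.pyGet? w (-1) with
  | some c => ['.', '!', '?'].contains c
  | none => false

def dollarify_alt (wordList : List String) (k : Int) : List String :=
  (wordList.foldl
    (fun (st : List String × Bool) w =>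
      let out := if st.2 then st.1 ++ List.replicate k.toNat "$" else st.1
      (out ++ [w], pvLastPunctB w))
    ([], true)).1

-- ===== PRECONDITION & SPEC =====
-- Pre_ excludes lists containing an empty-string word: there wordList[i][-1] raises IndexError in A (and in B).
def Pre_dollarify (wordList : List String) (k : Int) : Prop := ∀ w ∈ wordList, w ≠ ""
instance (wordList : List String) (k : Int) : Decidable (Pre_dollarify wordList k) := by unfold Pre_dollarify; infer_instance

def pvWitness_dollarify : List String × Int := (["ab.", "cd!", "ef"], 2)

def Spec_dollarify (wordList : List String) (k : Int) (out : List String) : Prop := out = dollarify_alt wordList k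
instance (wordList : List String) (k : Int) (out : List String) : Decidable (Spec_dollarify wordList k out) := by unfold Spec_dollarify; infer_instance

-- ===== CLAIM (what is proved, stated in full; the proofs are below) =====
def Claim_equal_dollarify : Prop := ∀ (wordList : List String) (k : Int), Dom_dollarify wordList k → Pre_dollarify wordList k → Spec_dollarify wordList k (dollarify wordList k)

-- ===== LEMMAS AND PROOFS =====

-- common reference function: simple one-step recursion on the list with the start flag
def pvG (k : Int) : Bool → List String → List String
  | _, [] => []
  | s, w :: ws =>
      (if s then List.replicate k.toNat "$" else []) ++ w :: pvG k (pvLastPunctA w) ws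

theorem pvB_foldl (k : Int) (l : List String) (acc : List String) (s : Bool) :
    (l.foldl
      (fun (st : List String × Bool) w =>
        let out := if st.2 then st.1 ++ List.replicate k.toNat "$" else st.1
        (out ++ [w], pvLastPunctB w))
      (acc, s)).1 = acc ++ pvG k s l := by
  induction l generalizing acc s with
  | nil => simp [pvG]
  | cons w ws ih =>
      simp only [List.foldl_cons, pvG]
      rw [ih]
      have : pvLastPunctB w = pvLastPunctA w := rfl
      cases s <;> simp [this]

theorem pvG_no_punct (k : Int) (l : List String) (h : ∀ w ∈ l, pvLastPunctA w = false) :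
    pvG k false l = l := by
  induction l with
  | nil => rfl
  | cons w ws ih =>
      have hw := h w (by simp)
      simp [pvG, hw, ih (fun x hx => h x (by simp [hx]))]

theorem pvFindPunct_none (l : List String) (h : pvFindPunct l = none) :
    ∀ w ∈ l, pvLastPunctA w = false := by
  induction l with
  | nil => simp
  | cons w ws ih =>
      intro x hx
      by_cases hw : pvLastPunctA w
      · simp [pvFindPunct, hw] at h
      · rcases List.mem_cons.mp hx with rfl | hx'
        · simpa using hw
        · exact ih (by simpa [pvFindPunct, hw, Option.map_eq_none_iff] using h) x hx'

theorem pvG_find_false (k : Int) (l : List String) (i : Nat) (h : pvFindPunct l = some i) :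
    pvG k false l = l.take (i + 1) ++ pvG k true (l.drop (i + 1)) := by
  induction l generalizing i with
  | nil => simp [pvFindPunct] at h
  | cons w ws ih =>
      by_cases hw : pvLastPunctA w
      · simp only [pvFindPunct, hw, if_true, Option.some.injEq] at h
        subst h
        simp [pvG, hw]
      · cases hws : pvFindPunct ws with
        | none => simp [pvFindPunct, hw, hws] at h
        | some j =>
            have hi : i = j + 1 := by simp [pvFindPunct, hw, hws] at h; omega
            subst hi
            simp [pvG, hw, ih j hws]

theorem pvG_find_true (k : Int) (l : List String) (i : Nat) (h : pvFindPunct l = some i) :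
    pvG k true l = List.replicate k.toNat "$" ++ l.take (i + 1) ++ pvG k true (l.drop (i + 1)) := by
  cases l with
  | nil => simp [pvFindPunct] at h
  | cons w ws =>
      by_cases hw : pvLastPunctA w
      · simp only [pvFindPunct, hw, if_true, Option.some.injEq] at h
        subst h
        simp [pvG, hw]
      · cases hws : pvFindPunct ws with
        | none => simp [pvFindPunct, hw, hws] at h
        | some j =>
            have hi : i = j + 1 := by simp [pvFindPunct, hw, hws] at h; omega
            subst hi
            simp [pvG, hw, pvG_find_false k ws j hws]

theorem pvA_eq_G (wordList : List String) (k : Int) :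
    dollarify wordList k = pvG k true wordList := by
  fun_induction dollarify wordList k with
  | case1 l h =>
      rw [List.length_eq_zero_iff.mp h]
      rfl
  | case2 l hne i hfind ih =>
      rw [ih]
      exact (pvG_find_true k l i hfind).symm
  | case3 l hne hfind =>
      cases l with
      | nil => simp at hne
      | cons w ws =>
          have hall := pvFindPunct_none _ hfind
          have hw := hall w (by simp)
          simp [pvG, hw, pvG_no_punct k ws (fun x hx => hall x (by simp [hx]))]

-- ===== VERDICT (by name: the statement is the Claim_ definition above) =====
theorem dollarify_spec : Claim_equal_dollarify := by
  intro wordList k _ _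
  unfold Spec_dollarify dollarify_alt
  rw [pvB_foldl, pvA_eq_G]
  simp
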